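-- pv_equiv track=rewrite | github.com/Ks-Classic/numbers-ai | scripts/base_statistics/02_extreme_cube/02-02_並び型分析/pattern_classifier.py | is_v_shape
-- ===== SOURCE A (Python) =====
-- from typing import List, Optional, Tuple, Dict, Any, Set, Union
--
-- def is_v_shape(positions: List[Tuple[int, int]]) -> bool:
--     """V字型かどうかを判定する
--
--     AとCが同じ行で1列を挟んで隣（列の差が2列以上）、
--     BがAとCのプラス1行目でAとCの間にある列に存在する
--
--     Args:
--         positions: 当選数字の位置リスト（3つの位置、1-indexed）
--
--     Returns:
--         V字型の場合True
--     """
--     if len(positions) != 3: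
--         return False
--
--     # すべての組み合わせを確認
--     for i in range(3):
--         for j in range(3):
--             if i == j:
--                 continue
--             k = 3 - i - j
--
--             pos_a = positions[i]
--             pos_b = positions[j]
--             pos_c = positions[k]
--
--             # AとCが同じ行で、列の差が2列以上か確認
--             if pos_a[0] == pos_c[0] and (pos_c[1] - pos_a[1]) >= 2:
--                 # BがAとCのプラス1行目で、AとCの間にある列か確認
--                 if (pos_b[0] == pos_a[0] + 1 and
--                     pos_a[1] < pos_b[1] < pos_c[1]):
--                     return True
--
--     return False
-- ===== SOURCE B (Python) =====
-- def is_v_shape(positions):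
--     if len(positions) != 3:
--         return False
--     a, c, b = sorted(positions)
--     return a[0] == c[0] and c[1] - a[1] >= 2 and b[0] == a[0] + 1 and a[1] < b[1] < c[1]
-- ===== Notes on version B (the rewrite author's own statement) =====
-- stated objective: simpler
-- what changed: B sorts the three points lexicographically once and performs a single check on the sorted triple (the V conditions force the sorted order to be [left, right, bottom]), instead of A's scan over all 6 index permutations with a derived third index.
import Mathlib
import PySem

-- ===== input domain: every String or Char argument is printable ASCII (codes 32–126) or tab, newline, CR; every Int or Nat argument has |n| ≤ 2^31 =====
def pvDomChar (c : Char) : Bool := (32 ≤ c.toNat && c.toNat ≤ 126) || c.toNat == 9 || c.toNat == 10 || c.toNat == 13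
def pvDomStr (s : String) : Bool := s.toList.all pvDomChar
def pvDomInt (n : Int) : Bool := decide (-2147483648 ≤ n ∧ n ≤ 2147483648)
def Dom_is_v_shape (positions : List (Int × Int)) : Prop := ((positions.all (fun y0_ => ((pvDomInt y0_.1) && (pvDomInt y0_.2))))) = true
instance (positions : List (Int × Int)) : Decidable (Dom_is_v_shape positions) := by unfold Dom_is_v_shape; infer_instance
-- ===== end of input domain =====

-- B sorts the three points lexicographically once and checks the sorted triple directly,
-- instead of A's scan over all 6 index permutations; objective: simpler.

-- ===== PORT A =====
-- literal port: for i in range(3): for j in range(3): skip i==j; k = 3-i-j; check the A/B/C conditions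
def is_v_shape (positions : List (Int × Int)) : Bool :=
  if positions.length ≠ 3 then false
  else
    (PySem.List.pyRange 0 3 1).any (fun i =>
      (PySem.List.pyRange 0 3 1).any (fun j =>
        if i == j then false
        else
          let k : Int := 3 - i - j
          match PySem.List.pyGet? positions i, PySem.List.pyGet? positions j,
                PySem.List.pyGet? positions k with
          | some a, some b, some c =>
            decide (a.1 = c.1) && decide (c.2 - a.2 ≥ 2) &&
            decide (b.1 = a.1 + 1) && decide (a.2 < b.2) && decide (b.2 < c.2)
          | _, _, _ => false))

-- ===== PORT B =====
-- literal port of Source B: a, c, b = sorted(positions)  (Python tuple sort = lexicographic,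
-- ported as PySem.List.sorted2 with keys fst, snd), then the single chained comparison
def is_v_shape_alt (positions : List (Int × Int)) : Bool :=
  if positions.length ≠ 3 then false
  else
    match PySem.List.sorted2 positions (fun p => p.1) (fun p => p.2) with
    | [a, c, b] =>
      decide (a.1 = c.1) && decide (c.2 - a.2 ≥ 2) &&
      decide (b.1 = a.1 + 1) && decide (a.2 < b.2) && decide (b.2 < c.2)
    | _ => false

-- ===== PRECONDITION & SPEC =====
def Spec_is_v_shape (positions : List (Int × Int)) (out : Bool) : Prop := out = is_v_shape_alt positions
instance (positions : List (Int × Int)) (out : Bool) : Decidable (Spec_is_v_shape positions out) := by unfold Spec_is_v_shape; infer_instance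

-- ===== CLAIM (what is proved, stated in full; the proofs are below) =====
def Claim_equal_is_v_shape : Prop := ∀ (positions : List (Int × Int)), Dom_is_v_shape positions → Spec_is_v_shape positions (is_v_shape positions)

-- ===== LEMMAS AND PROOFS =====
theorem main_eq (positions : List (Int × Int)) : is_v_shape positions = is_v_shape_alt positions := by
  match positions with
  | [] => rfl
  | [_] => rfl
  | [_, _] => rfl
  | _ :: _ :: _ :: _ :: _ => rfl
  | [⟨a1, a2⟩, ⟨b1, b2⟩, ⟨c1, c2⟩] =>
    have hr : PySem.List.pyRange 0 3 1 = [0, 1, 2] := by decide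
    simp only [is_v_shape, is_v_shape_alt, hr, List.any_cons, List.any_nil,
      PySem.List.sorted2, PySem.List.insertBy, List.foldl]
    rw [Bool.eq_iff_iff]
    norm_num [PySem.List.pyGet?, PySem.List.pyIdx?]
    simp only [show (2 : Int).toNat = 2 from rfl, List.getElem_cons_succ,
      List.getElem_cons_zero]
    split_ifs at * <;>
      (try simp only [PySem.List.insertBy]) <;> (try split_ifs at *) <;>
      (try simp only [PySem.List.insertBy]) <;> (try split_ifs at *) <;>
      (try simp only [Bool.and_eq_true, Bool.or_eq_true, Bool.not_eq_true, Bool.not_eq_true', decide_eq_true_eq,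
        decide_eq_false_iff_not, not_or, not_and, not_lt] at *) <;> omega

-- ===== VERDICT (by name: the statement is the Claim_ definition above) =====
theorem is_v_shape_spec : Claim_equal_is_v_shape := by
  intro positions _
  unfold Spec_is_v_shape
  exact main_eq positions
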